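-- pv_equiv track=rewrite | github.com/Jdalarmi/CodeSignal | Code-5.py | solution
-- ===== SOURCE A (Python) =====
-- def solution(n):
--     if (n==1):
--         return 1
--     else:
--         poli = 1
--         for i in range(1, n + 1):
--             poli = poli + i * 4 - 4
--         return poli
-- ===== SOURCE B (Python) =====
-- def solution(n):
--     if n < 1:
--         return 1
--     return 1 + 2 * n * (n - 1)
-- ===== Notes on version B (the rewrite author's own statement) =====
-- stated objective: faster
-- what changed: Replaced the O(n) accumulation loop over range(1, n+1) by the closed form 1 + 2*n*(n-1) of the arithmetic series (with the empty-series value 1 for n < 1).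
import Mathlib
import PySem

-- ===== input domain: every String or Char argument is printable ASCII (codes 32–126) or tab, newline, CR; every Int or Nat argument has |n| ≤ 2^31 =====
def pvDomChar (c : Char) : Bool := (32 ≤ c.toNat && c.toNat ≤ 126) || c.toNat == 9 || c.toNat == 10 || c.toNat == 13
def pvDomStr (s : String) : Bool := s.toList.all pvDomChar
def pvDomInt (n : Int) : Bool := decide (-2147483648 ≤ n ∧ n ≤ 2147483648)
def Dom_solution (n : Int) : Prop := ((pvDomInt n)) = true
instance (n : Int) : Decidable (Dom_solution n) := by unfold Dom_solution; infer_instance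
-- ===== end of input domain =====

-- B replaces A's O(n) accumulation loop by the closed form 1 + 2*n*(n-1) (faster, asymptotic).


-- ===== PORT A =====
def solution (n : Int) : Int :=
  if n == 1 then 1
  else (PySem.List.pyRange 1 (n + 1) 1).foldl (fun poli i => poli + i * 4 - 4) 1

-- ===== PORT B =====
def solution_alt (n : Int) : Int :=
  if n < 1 then 1 else 1 + 2 * n * (n - 1)

-- ===== PRECONDITION & SPEC =====
def Spec_solution (n : Int) (out : Int) : Prop := out = solution_alt n
instance (n : Int) (out : Int) : Decidable (Spec_solution n out) := by unfold Spec_solution; infer_instance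

-- ===== CLAIM (what is proved, stated in full; the proofs are below) =====
def Claim_equal_solution : Prop := ∀ (n : Int), Dom_solution n → Spec_solution n (solution n)

-- ===== LEMMAS AND PROOFS =====

theorem solution_loop (m : Nat) (acc : Int) :
    (PySem.List.pyRange 1 ((m : Int) + 1) 1).foldl (fun poli i => poli + i * 4 - 4) acc
      = acc + 2 * m * m - 2 * m := by
  induction m generalizing acc with
  | zero => simp [PySem.List.pyRange_one_eq_nil]
  | succ k ih =>
    rw [show ((k + 1 : Nat) : Int) + 1 = ((k : Int) + 1) + 1 by push_cast; ring,
        PySem.List.pyRange_one_succ_right (by omega), List.foldl_append, ih]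
    simp only [List.foldl_cons, List.foldl_nil]
    push_cast
    ring

-- ===== VERDICT (by name: the statement is the Claim_ definition above) =====
theorem solution_spec : Claim_equal_solution := by
  intro n _
  unfold Spec_solution solution solution_alt
  by_cases h1 : n = 1
  · subst h1; decide
  · simp only [beq_iff_eq, h1, if_false]
    by_cases hlt : n < 1
    · rw [PySem.List.pyRange_one_eq_nil (by omega)]
      simp [hlt]
    · obtain ⟨m, rfl⟩ : ∃ m : Nat, n = (m : Int) :=
        ⟨n.toNat, (Int.toNat_of_nonneg (by omega)).symm⟩
      rw [solution_loop]
      simp only [hlt, if_false]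
      ring
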